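-- pv_equiv track=rewrite | github.com/mire403/WhatShouldICite | planner.py | _plan_with_rules
-- ===== SOURCE A (Python) =====
-- from typing import List, Dict, Any, Optional
--
-- def _plan_with_rules(text: str, intent: str) -> List[str]:
--     """基于规则的规划（增强版，更专业）"""
--     text_lower = text.lower()
--     suggestions = []
--
--     if intent == "foundational_work":
--         suggestions.append("The original/foundational paper introducing this concept")
--         suggestions.append("Seminal works establishing the theoretical foundation")
--
--     elif intent == "method_technique":
--         # 根据具体技术领域给出建议
--         if any(kw in text_lower for kw in ["deep learning", "neural network", "neural", "cnn", "rnn", "transformer"]):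
--             suggestions.append("Foundational works on deep learning and neural networks")
--             suggestions.append("Recent advances in deep learning architectures")
--             suggestions.append("State-of-the-art neural network methods")
--         elif any(kw in text_lower for kw in ["optimization", "gradient", "adam", "sgd"]):
--             suggestions.append("Foundational works on optimization algorithms")
--             suggestions.append("Recent optimization methods and techniques")
--         elif any(kw in text_lower for kw in ["reinforcement", "rl", "q-learning"]):
--             suggestions.append("Foundational works on reinforcement learning")
--             suggestions.append("Recent advances in RL algorithms")
--         elif any(kw in text_lower for kw in ["computer vision", "image", "visual"]):
--             suggestions.append("Foundational works on computer vision")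
--             suggestions.append("Recent computer vision methods")
--         elif any(kw in text_lower for kw in ["nlp", "natural language", "language model"]):
--             suggestions.append("Foundational works on natural language processing")
--             suggestions.append("Recent NLP methods and language models")
--         else:
--             suggestions.append("Foundational works on the method/technique")
--             suggestions.append("Recent advances in this technique")
--             suggestions.append("State-of-the-art methods in this area")
--
--     elif intent == "comparison":
--         suggestions.append("Benchmark studies comparing different approaches")
--         suggestions.append("Comparative evaluations of existing methods")
--         suggestions.append("Performance analysis studies")
--
--     elif intent == "factual_claim" or intent == "theoretical_claim":
--         suggestions.append("Empirical studies demonstrating this claim")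
--         suggestions.append("Theoretical works supporting this statement")
--         suggestions.append("Recent research validating this finding")
--
--     elif intent == "survey_review":
--         suggestions.append("Comprehensive surveys on this topic")
--         suggestions.append("Recent review papers")
--         suggestions.append("State-of-the-art overviews")
--
--     elif intent == "recent_advance":
--         suggestions.append("Recent advances in this area")
--         suggestions.append("State-of-the-art methods")
--         suggestions.append("Latest research developments")
--
--     elif intent == "common_knowledge":
--         return []  # 不需要引用
--
--     else:
--         suggestions.append("Related works on this topic")
--         suggestions.append("Relevant research in this area")
--
--     return suggestions
-- ===== SOURCE B (Python) =====
-- # B: one flat first-match rule engine -- a single ordered table of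
-- # (intent-pattern, keyword-pattern, suggestions) rules scanned in one uniform
-- # loop, replacing A's two nested if/elif chains; objective: alternative.
--
-- _CLAIM = [
--     "Empirical studies demonstrating this claim",
--     "Theoretical works supporting this statement",
--     "Recent research validating this finding",
-- ]
--
-- # A rule matches when (intent pattern is None or equals intent) and
-- # (keyword pattern is None or some keyword occurs in the lowered text).
-- # The final (None, None, ...) wildcard rule guarantees the scan returns.
-- _RULES = [
--     ("foundational_work", None,
--      ["The original/foundational paper introducing this concept",
--       "Seminal works establishing the theoretical foundation"]),
--     ("method_technique",
--      ("deep learning", "neural network", "neural", "cnn", "rnn", "transformer"),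
--      ["Foundational works on deep learning and neural networks",
--       "Recent advances in deep learning architectures",
--       "State-of-the-art neural network methods"]),
--     ("method_technique", ("optimization", "gradient", "adam", "sgd"),
--      ["Foundational works on optimization algorithms",
--       "Recent optimization methods and techniques"]),
--     ("method_technique", ("reinforcement", "rl", "q-learning"),
--      ["Foundational works on reinforcement learning",
--       "Recent advances in RL algorithms"]),
--     ("method_technique", ("computer vision", "image", "visual"),
--      ["Foundational works on computer vision",
--       "Recent computer vision methods"]),
--     ("method_technique", ("nlp", "natural language", "language model"),
--      ["Foundational works on natural language processing",
--       "Recent NLP methods and language models"]),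
--     ("method_technique", None,
--      ["Foundational works on the method/technique",
--       "Recent advances in this technique",
--       "State-of-the-art methods in this area"]),
--     ("comparison", None,
--      ["Benchmark studies comparing different approaches",
--       "Comparative evaluations of existing methods",
--       "Performance analysis studies"]),
--     ("factual_claim", None, _CLAIM),
--     ("theoretical_claim", None, _CLAIM),
--     ("survey_review", None,
--      ["Comprehensive surveys on this topic",
--       "Recent review papers",
--       "State-of-the-art overviews"]),
--     ("recent_advance", None,
--      ["Recent advances in this area",
--       "State-of-the-art methods",
--       "Latest research developments"]),
--     ("common_knowledge", None, []),
--     (None, None,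
--      ["Related works on this topic",
--       "Relevant research in this area"]),
-- ]
--
--
-- def _plan_with_rules(text: str, intent: str):
--     tl = text.lower()
--     for rule_intent, kws, out in _RULES:
--         if (rule_intent is None or rule_intent == intent) and \
--            (kws is None or any(k in tl for k in kws)):
--             return list(out)
-- ===== Notes on version B (the rewrite author's own statement) =====
-- stated objective: alternative
-- what changed: Replaces A's two nested if/elif chains with a single flat ordered table of (intent-pattern, keyword-pattern, suggestions) rules scanned by one uniform first-match loop with a wildcard fallback rule.
import Mathlib
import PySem

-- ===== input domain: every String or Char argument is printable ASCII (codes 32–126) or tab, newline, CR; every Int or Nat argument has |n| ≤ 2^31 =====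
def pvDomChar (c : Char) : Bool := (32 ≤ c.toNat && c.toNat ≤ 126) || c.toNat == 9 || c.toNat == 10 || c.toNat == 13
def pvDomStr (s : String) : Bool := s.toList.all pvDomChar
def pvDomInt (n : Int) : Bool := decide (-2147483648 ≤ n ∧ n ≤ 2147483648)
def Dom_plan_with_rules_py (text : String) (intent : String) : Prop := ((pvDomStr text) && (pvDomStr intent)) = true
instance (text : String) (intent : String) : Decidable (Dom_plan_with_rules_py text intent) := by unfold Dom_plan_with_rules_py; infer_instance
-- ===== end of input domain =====

-- B replaces A's two nested if/elif chains with one flat ordered rule table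
-- (intent-pattern, keyword-pattern, suggestions) scanned by a single
-- first-match loop with a wildcard fallback rule (objective: alternative).

-- ===== PORT A =====
-- literal transliteration of A's if/elif chain; 'kw in text_lower' = PySem.Str.isIn
def plan_with_rules_py (text : String) (intent : String) : List String :=
  let text_lower := PySem.Str.lower text
  if intent == "foundational_work" then
    ["The original/foundational paper introducing this concept",
     "Seminal works establishing the theoretical foundation"]
  else if intent == "method_technique" then
    if ["deep learning", "neural network", "neural", "cnn", "rnn", "transformer"].any
        (fun kw => PySem.Str.isIn kw text_lower) then
      ["Foundational works on deep learning and neural networks",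
       "Recent advances in deep learning architectures",
       "State-of-the-art neural network methods"]
    else if ["optimization", "gradient", "adam", "sgd"].any
        (fun kw => PySem.Str.isIn kw text_lower) then
      ["Foundational works on optimization algorithms",
       "Recent optimization methods and techniques"]
    else if ["reinforcement", "rl", "q-learning"].any
        (fun kw => PySem.Str.isIn kw text_lower) then
      ["Foundational works on reinforcement learning",
       "Recent advances in RL algorithms"]
    else if ["computer vision", "image", "visual"].any
        (fun kw => PySem.Str.isIn kw text_lower) then
      ["Foundational works on computer vision",
       "Recent computer vision methods"]
    else if ["nlp", "natural language", "language model"].any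
        (fun kw => PySem.Str.isIn kw text_lower) then
      ["Foundational works on natural language processing",
       "Recent NLP methods and language models"]
    else
      ["Foundational works on the method/technique",
       "Recent advances in this technique",
       "State-of-the-art methods in this area"]
  else if intent == "comparison" then
    ["Benchmark studies comparing different approaches",
     "Comparative evaluations of existing methods",
     "Performance analysis studies"]
  else if intent == "factual_claim" || intent == "theoretical_claim" then
    ["Empirical studies demonstrating this claim",
     "Theoretical works supporting this statement",
     "Recent research validating this finding"]
  else if intent == "survey_review" then
    ["Comprehensive surveys on this topic",
     "Recent review papers",
     "State-of-the-art overviews"]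
  else if intent == "recent_advance" then
    ["Recent advances in this area",
     "State-of-the-art methods",
     "Latest research developments"]
  else if intent == "common_knowledge" then
    []
  else
    ["Related works on this topic",
     "Relevant research in this area"]

-- ===== PORT B =====
def pvClaimSugg : List String :=
  ["Empirical studies demonstrating this claim",
   "Theoretical works supporting this statement",
   "Recent research validating this finding"]

-- the flat _RULES table of Source B: (intent pattern, keyword pattern, suggestions);
-- 'None' patterns are 'none', tuples of keywords are 'some [..]'
def pvRules : List (Option String × Option (List String) × List String) :=
  [(some "foundational_work", none,
    ["The original/foundational paper introducing this concept",
     "Seminal works establishing the theoretical foundation"]),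
   (some "method_technique",
    some ["deep learning", "neural network", "neural", "cnn", "rnn", "transformer"],
    ["Foundational works on deep learning and neural networks",
     "Recent advances in deep learning architectures",
     "State-of-the-art neural network methods"]),
   (some "method_technique", some ["optimization", "gradient", "adam", "sgd"],
    ["Foundational works on optimization algorithms",
     "Recent optimization methods and techniques"]),
   (some "method_technique", some ["reinforcement", "rl", "q-learning"],
    ["Foundational works on reinforcement learning",
     "Recent advances in RL algorithms"]),
   (some "method_technique", some ["computer vision", "image", "visual"],
    ["Foundational works on computer vision",
     "Recent computer vision methods"]),
   (some "method_technique", some ["nlp", "natural language", "language model"],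
    ["Foundational works on natural language processing",
     "Recent NLP methods and language models"]),
   (some "method_technique", none,
    ["Foundational works on the method/technique",
     "Recent advances in this technique",
     "State-of-the-art methods in this area"]),
   (some "comparison", none,
    ["Benchmark studies comparing different approaches",
     "Comparative evaluations of existing methods",
     "Performance analysis studies"]),
   (some "factual_claim", none, pvClaimSugg),
   (some "theoretical_claim", none, pvClaimSugg),
   (some "survey_review", none,
    ["Comprehensive surveys on this topic",
     "Recent review papers",
     "State-of-the-art overviews"]),
   (some "recent_advance", none,
    ["Recent advances in this area",
     "State-of-the-art methods",
     "Latest research developments"]),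
   (some "common_knowledge", none, []),
   (none, none,
    ["Related works on this topic",
     "Relevant research in this area"])]

-- does a rule pattern match? (None matches everything)
def pvIntentMatch (pat : Option String) (intent : String) : Bool :=
  match pat with
  | none => true
  | some s => s == intent

def pvKwMatch (pat : Option (List String)) (tl : String) : Bool :=
  match pat with
  | none => true
  | some kws => kws.any (fun k => PySem.Str.isIn k tl)

-- the uniform first-match loop of Source B; the Python returns None if no rule
-- matches, which the wildcard last rule makes unreachable — [] only for the
-- impossible empty-table case
def pvScanRules (rules : List (Option String × Option (List String) × List String))
    (intent : String) (tl : String) : List String :=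
  match rules with
  | [] => []
  | (ip, kp, out) :: rest =>
      if pvIntentMatch ip intent && pvKwMatch kp tl then out
      else pvScanRules rest intent tl

def plan_with_rules_py_alt (text : String) (intent : String) : List String :=
  pvScanRules pvRules intent (PySem.Str.lower text)

-- ===== PRECONDITION & SPEC =====
def Spec_plan_with_rules_py (text : String) (intent : String) (out : List String) : Prop := out = plan_with_rules_py_alt text intent
instance (text : String) (intent : String) (out : List String) : Decidable (Spec_plan_with_rules_py text intent out) := by unfold Spec_plan_with_rules_py; infer_instance

-- ===== CLAIM (what is proved, stated in full; the proofs are below) =====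
def Claim_equal_plan_with_rules_py : Prop := ∀ (text : String) (intent : String), Dom_plan_with_rules_py text intent → Spec_plan_with_rules_py text intent (plan_with_rules_py text intent)

-- ===== LEMMAS AND PROOFS =====

-- ===== VERDICT (by name: the statement is the Claim_ definition above) =====
theorem plan_with_rules_py_spec : Claim_equal_plan_with_rules_py := by
  intro text intent _
  unfold Spec_plan_with_rules_py plan_with_rules_py plan_with_rules_py_alt
  by_cases hm : intent = "method_technique"
  · subst hm
    simp [pvRules, pvScanRules, pvIntentMatch, pvKwMatch, pvClaimSugg]
  by_cases h1 : intent = "foundational_work"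
  · subst h1; simp [pvRules, pvScanRules, pvIntentMatch, pvKwMatch]
  by_cases h2 : intent = "comparison"
  · subst h2; simp [pvRules, pvScanRules, pvIntentMatch, pvKwMatch]
  by_cases h3 : intent = "factual_claim"
  · subst h3; simp [pvRules, pvScanRules, pvIntentMatch, pvKwMatch, pvClaimSugg]
  by_cases h4 : intent = "theoretical_claim"
  · subst h4; simp [pvRules, pvScanRules, pvIntentMatch, pvKwMatch, pvClaimSugg]
  by_cases h5 : intent = "survey_review"
  · subst h5; simp [pvRules, pvScanRules, pvIntentMatch, pvKwMatch]
  by_cases h6 : intent = "recent_advance"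
  · subst h6; simp [pvRules, pvScanRules, pvIntentMatch, pvKwMatch]
  by_cases h7 : intent = "common_knowledge"
  · subst h7; simp [pvRules, pvScanRules, pvIntentMatch, pvKwMatch]
  have fm : (intent == "method_technique") = false := beq_eq_false_iff_ne.mpr hm
  have f1 : (intent == "foundational_work") = false := beq_eq_false_iff_ne.mpr h1
  have g1 : ("foundational_work" == intent) = false := beq_eq_false_iff_ne.mpr (Ne.symm h1)
  have gm : ("method_technique" == intent) = false := beq_eq_false_iff_ne.mpr (Ne.symm hm)
  have f2 : (intent == "comparison") = false := beq_eq_false_iff_ne.mpr h2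
  have g2 : ("comparison" == intent) = false := beq_eq_false_iff_ne.mpr (Ne.symm h2)
  have f3 : (intent == "factual_claim") = false := beq_eq_false_iff_ne.mpr h3
  have g3 : ("factual_claim" == intent) = false := beq_eq_false_iff_ne.mpr (Ne.symm h3)
  have f4 : (intent == "theoretical_claim") = false := beq_eq_false_iff_ne.mpr h4
  have g4 : ("theoretical_claim" == intent) = false := beq_eq_false_iff_ne.mpr (Ne.symm h4)
  have f5 : (intent == "survey_review") = false := beq_eq_false_iff_ne.mpr h5
  have g5 : ("survey_review" == intent) = false := beq_eq_false_iff_ne.mpr (Ne.symm h5)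
  have f6 : (intent == "recent_advance") = false := beq_eq_false_iff_ne.mpr h6
  have g6 : ("recent_advance" == intent) = false := beq_eq_false_iff_ne.mpr (Ne.symm h6)
  have f7 : (intent == "common_knowledge") = false := beq_eq_false_iff_ne.mpr h7
  have g7 : ("common_knowledge" == intent) = false := beq_eq_false_iff_ne.mpr (Ne.symm h7)
  simp [pvRules, pvScanRules, pvIntentMatch, pvKwMatch, fm, f1, f2, f3, f4, f5, f6, f7, gm, g1, g2, g3, g4, g5, g6, g7]
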